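-- pv_equiv track=rewrite | github.com/SrijaAdhya12/IBM-Coding | questions/findMinOpreations.py | findMinOperations
-- ===== SOURCE A (Python) =====
-- def findMinOperations(s):
--     pattern = "abc"
--     i = 0
--     pos = 0
--     opreations = 0
--     while i < len(s):
--         alphabet = pattern[pos]
--         if s[i] == alphabet:
--             i += 1
--             pos = (pos+1)%3
--         else:
--             opreations += 1
--             pos = (pos+1)%3
--     if pos != 0:
--         remaining = 3 - pos
--         opreations += remaining
--     return opreations
-- ===== SOURCE B (Python) =====
-- def findMinOperations(s):
--     # closed-form per-character: skipped steps = (target - pos) % 3, no simulated walk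
--     target = {'a': 0, 'b': 1, 'c': 2}
--     pos = 0
--     ops = 0
--     for ch in s:
--         t = target[ch]
--         ops += (t - pos) % 3
--         pos = (t + 1) % 3
--     if pos != 0:
--         ops += 3 - pos
--     return ops
-- ===== Notes on version B (the rewrite author's own statement) =====
-- stated objective: alternative
-- what changed: Replaces A's step-by-step simulated walk around the three-letter cycle (one loop iteration per skipped position) with a single pass over the characters using the closed form (target - pos) % 3 for the number of skipped operations per character.
import Mathlib
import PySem

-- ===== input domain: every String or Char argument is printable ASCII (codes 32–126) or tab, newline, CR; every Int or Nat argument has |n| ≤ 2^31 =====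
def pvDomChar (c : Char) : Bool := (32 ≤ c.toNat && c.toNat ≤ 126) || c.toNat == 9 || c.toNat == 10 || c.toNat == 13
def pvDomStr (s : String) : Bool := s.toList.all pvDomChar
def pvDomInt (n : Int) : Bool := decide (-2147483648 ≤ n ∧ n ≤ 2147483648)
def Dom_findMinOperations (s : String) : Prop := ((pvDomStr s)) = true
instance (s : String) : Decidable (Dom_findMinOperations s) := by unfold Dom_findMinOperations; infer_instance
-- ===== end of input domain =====

-- B replaces A's step-by-step walk of the three-letter cycle by a per-character closed form
-- ((target - pos) % 3 skipped steps); objective: alternative/simpler decomposition.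

-- ===== PORT A =====
-- A's while loop over index i / cycle position pos / operation counter; it terminates
-- only when every character of s lies in "abc" (otherwise Python loops forever), so the
-- port carries a fuel argument: 3*|s|+1 steps suffice on every input admitted by Pre_,
-- and the fuel-0 value is never reached there.
def loopA (cs : List Char) : Nat → Nat → Nat → Int → Nat × Int
  | 0, _, pos, ops => (pos, ops)
  | fuel+1, i, pos, ops =>
    if i < cs.length then
      -- alphabet = pattern[pos]; indices are always in range here (pos < 3, i < len)
      if cs.getD i ' ' = "abc".toList.getD pos ' ' then
        loopA cs fuel (i+1) ((pos+1)%3) ops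
      else
        loopA cs fuel i ((pos+1)%3) (ops+1)
    else (pos, ops)

def findMinOperations (s : String) : Int :=
  let cs := s.toList
  let r := loopA cs (3*cs.length+1) 0 0 0
  if r.1 ≠ 0 then r.2 + ((3:Int) - (r.1:Int)) else r.2

-- ===== PORT B =====
-- target = {'a':0,'b':1,'c':2}[ch]; KeyError (outside Pre_) ported as Option, with an
-- unreachable-inside-Pre_ default of 0.
def bTarget (ch : Char) : Nat :=
  ((PySem.Dict.ofList [('a',0),('b',1),('c',2)]).get? ch).getD 0

def stepB (st : Nat × Int) (ch : Char) : Nat × Int :=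
  let t := bTarget ch
  ((t+1)%3, st.2 + PySem.Int.mod ((t:Int) - (st.1:Int)) 3)

def findMinOperations_alt (s : String) : Int :=
  let st := s.toList.foldl stepB (0, 0)
  if st.1 ≠ 0 then st.2 + ((3:Int) - (st.1:Int)) else st.2

-- ===== PRECONDITION & SPEC =====
-- Pre_ excludes strings containing a character outside the cycle alphabet: there Python A
-- never returns (infinite loop) and Python B raises KeyError.
def Pre_findMinOperations (s : String) : Prop :=
  (s.toList.all fun c => c == 'a' || c == 'b' || c == 'c') = true
instance (s : String) : Decidable (Pre_findMinOperations s) := by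
  unfold Pre_findMinOperations; infer_instance

def pvWitness_findMinOperations : String := "abacbc"

def Spec_findMinOperations (s : String) (out : Int) : Prop := out = findMinOperations_alt s
instance (s : String) (out : Int) : Decidable (Spec_findMinOperations s out) := by unfold Spec_findMinOperations; infer_instance

-- ===== CLAIM (what is proved, stated in full; the proofs are below) =====
def Claim_equal_findMinOperations : Prop := ∀ (s : String), Dom_findMinOperations s → Pre_findMinOperations s → Spec_findMinOperations s (findMinOperations s)

-- ===== LEMMAS AND PROOFS =====

theorem bT_a : bTarget 'a' = 0 := by decide
theorem bT_b : bTarget 'b' = 1 := by decide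
theorem bT_c : bTarget 'c' = 2 := by decide

-- From cs.drop i = c :: rest we read off the current character and the next drop.
theorem drop_cons_get? {cs rest : List Char} {c : Char} {i : Nat}
    (h : cs.drop i = c :: rest) :
    cs[i]? = some c ∧ cs.drop (i+1) = rest := by
  constructor
  · have := congrArg List.head? h
    simpa [List.head?_drop] using this
  · have := congrArg List.tail h
    simpa [List.tail_drop] using this

-- Main invariant: with enough fuel, A's walk from (i, pos, ops) over the remaining
-- characters computes exactly B's fold over them.
theorem loopA_eq_foldB : ∀ (rest cs : List Char) (i pos : Nat) (ops : Int) (fuel : Nat),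
    cs.drop i = rest → pos < 3 → (∀ c ∈ rest, c = 'a' ∨ c = 'b' ∨ c = 'c') →
    3 * rest.length < fuel →
    loopA cs fuel i pos ops = rest.foldl stepB (pos, ops) := by
  intro rest
  induction rest with
  | nil =>
    intro cs i pos ops fuel hdrop _ _ hfuel
    obtain ⟨f, rfl⟩ : ∃ f, fuel = f + 1 := ⟨fuel - 1, by omega⟩
    have hlen : cs.length ≤ i := List.drop_eq_nil_iff.mp hdrop
    simp [loopA, Nat.not_lt.mpr hlen]
  | cons c rest ih =>
    intro cs i pos ops fuel hdrop hpos habc hfuel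
    obtain ⟨hget, hdrop'⟩ := drop_cons_get? hdrop
    obtain ⟨hi, hc⟩ := List.getElem?_eq_some_iff.mp hget
    simp only [List.length_cons] at hfuel
    have habc' : ∀ x ∈ rest, x = 'a' ∨ x = 'b' ∨ x = 'c' := fun x hx => habc x (by simp [hx])
    have hcabc : c = 'a' ∨ c = 'b' ∨ c = 'c' := habc c (by simp)
    -- number of skipped steps k = (target c - pos) % 3 ∈ {0,1,2}; unfold k+1 fuel steps
    interval_cases pos <;> rcases hcabc with rfl | rfl | rfl
    -- pos = 0
    · obtain ⟨f, rfl⟩ : ∃ f, fuel = f + 1 := ⟨fuel - 1, by omega⟩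
      rw [show loopA cs (f+1) i 0 ops = loopA cs f (i+1) 1 ops by simp [loopA, hi, hc]]
      rw [ih cs (i+1) 1 ops f hdrop' (by omega) habc' (by omega)]
      rw [List.foldl_cons]
      congr 1
      try simp [stepB, bT_a, bT_b, bT_c, PySem.Int.mod_eq_emod_of_pos]
      try ring
    · obtain ⟨f, rfl⟩ : ∃ f, fuel = f + 2 := ⟨fuel - 2, by omega⟩
      rw [show loopA cs (f+2) i 0 ops = loopA cs (f+1) i 1 (ops+1) by simp [loopA, hi, hc]]
      rw [show loopA cs (f+1) i 1 (ops+1) = loopA cs f (i+1) 2 (ops+1) by simp [loopA, hi, hc]]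
      rw [ih cs (i+1) 2 (ops+1) f hdrop' (by omega) habc' (by omega)]
      rw [List.foldl_cons]
      congr 1
      try simp [stepB, bT_a, bT_b, bT_c, PySem.Int.mod_eq_emod_of_pos]
      try ring
    · obtain ⟨f, rfl⟩ : ∃ f, fuel = f + 3 := ⟨fuel - 3, by omega⟩
      rw [show loopA cs (f+3) i 0 ops = loopA cs (f+2) i 1 (ops+1) by simp [loopA, hi, hc]]
      rw [show loopA cs (f+2) i 1 (ops+1) = loopA cs (f+1) i 2 (ops+1+1) by simp [loopA, hi, hc]]
      rw [show loopA cs (f+1) i 2 (ops+1+1) = loopA cs f (i+1) 0 (ops+1+1) by simp [loopA, hi, hc]]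
      rw [ih cs (i+1) 0 (ops+1+1) f hdrop' (by omega) habc' (by omega)]
      rw [List.foldl_cons]
      congr 1
      try simp [stepB, bT_a, bT_b, bT_c, PySem.Int.mod_eq_emod_of_pos]
      try ring
    -- pos = 1
    · obtain ⟨f, rfl⟩ : ∃ f, fuel = f + 3 := ⟨fuel - 3, by omega⟩
      rw [show loopA cs (f+3) i 1 ops = loopA cs (f+2) i 2 (ops+1) by simp [loopA, hi, hc]]
      rw [show loopA cs (f+2) i 2 (ops+1) = loopA cs (f+1) i 0 (ops+1+1) by simp [loopA, hi, hc]]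
      rw [show loopA cs (f+1) i 0 (ops+1+1) = loopA cs f (i+1) 1 (ops+1+1) by simp [loopA, hi, hc]]
      rw [ih cs (i+1) 1 (ops+1+1) f hdrop' (by omega) habc' (by omega)]
      rw [List.foldl_cons]
      congr 1
      try simp [stepB, bT_a, bT_b, bT_c, PySem.Int.mod_eq_emod_of_pos]
      try ring
    · obtain ⟨f, rfl⟩ : ∃ f, fuel = f + 1 := ⟨fuel - 1, by omega⟩
      rw [show loopA cs (f+1) i 1 ops = loopA cs f (i+1) 2 ops by simp [loopA, hi, hc]]
      rw [ih cs (i+1) 2 ops f hdrop' (by omega) habc' (by omega)]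
      rw [List.foldl_cons]
      congr 1
      try simp [stepB, bT_a, bT_b, bT_c, PySem.Int.mod_eq_emod_of_pos]
      try ring
    · obtain ⟨f, rfl⟩ : ∃ f, fuel = f + 2 := ⟨fuel - 2, by omega⟩
      rw [show loopA cs (f+2) i 1 ops = loopA cs (f+1) i 2 (ops+1) by simp [loopA, hi, hc]]
      rw [show loopA cs (f+1) i 2 (ops+1) = loopA cs f (i+1) 0 (ops+1) by simp [loopA, hi, hc]]
      rw [ih cs (i+1) 0 (ops+1) f hdrop' (by omega) habc' (by omega)]
      rw [List.foldl_cons]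
      congr 1
      try simp [stepB, bT_a, bT_b, bT_c, PySem.Int.mod_eq_emod_of_pos]
      try ring
    -- pos = 2
    · obtain ⟨f, rfl⟩ : ∃ f, fuel = f + 2 := ⟨fuel - 2, by omega⟩
      rw [show loopA cs (f+2) i 2 ops = loopA cs (f+1) i 0 (ops+1) by simp [loopA, hi, hc]]
      rw [show loopA cs (f+1) i 0 (ops+1) = loopA cs f (i+1) 1 (ops+1) by simp [loopA, hi, hc]]
      rw [ih cs (i+1) 1 (ops+1) f hdrop' (by omega) habc' (by omega)]
      rw [List.foldl_cons]
      congr 1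
      try simp [stepB, bT_a, bT_b, bT_c, PySem.Int.mod_eq_emod_of_pos]
      try ring
    · obtain ⟨f, rfl⟩ : ∃ f, fuel = f + 3 := ⟨fuel - 3, by omega⟩
      rw [show loopA cs (f+3) i 2 ops = loopA cs (f+2) i 0 (ops+1) by simp [loopA, hi, hc]]
      rw [show loopA cs (f+2) i 0 (ops+1) = loopA cs (f+1) i 1 (ops+1+1) by simp [loopA, hi, hc]]
      rw [show loopA cs (f+1) i 1 (ops+1+1) = loopA cs f (i+1) 2 (ops+1+1) by simp [loopA, hi, hc]]
      rw [ih cs (i+1) 2 (ops+1+1) f hdrop' (by omega) habc' (by omega)]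
      rw [List.foldl_cons]
      congr 1
      try simp [stepB, bT_a, bT_b, bT_c, PySem.Int.mod_eq_emod_of_pos]
      try ring
    · obtain ⟨f, rfl⟩ : ∃ f, fuel = f + 1 := ⟨fuel - 1, by omega⟩
      rw [show loopA cs (f+1) i 2 ops = loopA cs f (i+1) 0 ops by simp [loopA, hi, hc]]
      rw [ih cs (i+1) 0 ops f hdrop' (by omega) habc' (by omega)]
      rw [List.foldl_cons]
      congr 1
      try simp [stepB, bT_a, bT_b, bT_c, PySem.Int.mod_eq_emod_of_pos]
      try ring

-- ===== VERDICT (by name: the statement is the Claim_ definition above) =====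
theorem findMinOperations_spec : Claim_equal_findMinOperations := by
  intro s _ hpre
  unfold Spec_findMinOperations findMinOperations findMinOperations_alt
  have hpre' : ∀ c ∈ s.toList, c = 'a' ∨ c = 'b' ∨ c = 'c' := by
    intro c hc
    have := List.all_eq_true.mp hpre c hc
    simpa [or_assoc] using this
  have h := loopA_eq_foldB s.toList s.toList 0 0 0 (3*s.toList.length+1) (by simp) (by omega)
    hpre' (by omega)
  simp only [h]
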